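-- pv_equiv track=rewrite | github.com/Omega1994/Advent_of_Code | AoCs/AoC4/aoc4.py | compare_winning_numbers
-- ===== SOURCE A (Python) =====
-- def compare_winning_numbers(winning, your):
--     won = 0
--     for number in winning:
--         if number in your:
--             if won == 0:
--                 won += 1
--             else:
--                 won = won * 2
--     return won
-- ===== SOURCE B (Python) =====
-- def compare_winning_numbers(winning, your):
--     yours = set(your)
--     count = sum(1 for number in winning if number in yours)
--     return 0 if count == 0 else 2 ** (count - 1)
-- ===== Notes on version B (the rewrite author's own statement) =====
-- stated objective: faster
-- what changed: Counts matches in one pass with a set for O(1) lookup and computes the score as the closed form 2**(count-1), replacing the inner list scan and the conditional doubling accumulator.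
import Mathlib
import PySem

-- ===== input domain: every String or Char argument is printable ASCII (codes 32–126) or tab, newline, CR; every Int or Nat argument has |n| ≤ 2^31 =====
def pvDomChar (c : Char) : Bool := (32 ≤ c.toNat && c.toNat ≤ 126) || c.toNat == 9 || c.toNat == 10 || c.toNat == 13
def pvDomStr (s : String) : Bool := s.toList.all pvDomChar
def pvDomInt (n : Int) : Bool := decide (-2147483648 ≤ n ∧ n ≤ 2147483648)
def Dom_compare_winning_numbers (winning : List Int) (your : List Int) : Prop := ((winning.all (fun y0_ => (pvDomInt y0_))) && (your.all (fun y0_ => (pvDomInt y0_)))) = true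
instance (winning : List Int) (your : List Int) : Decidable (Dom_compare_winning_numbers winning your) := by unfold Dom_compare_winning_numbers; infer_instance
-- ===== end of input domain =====

-- B replaces the in-loop conditional doubling by a match count and the closed form 2^(count-1); objective: simpler.

-- ===== PORT A =====
def compare_winning_numbers (winning : List Int) (your : List Int) : Int :=
  winning.foldl (fun won number =>
    if number ∈ your then
      (if won = 0 then won + 1 else won * 2)
    else won) 0

-- ===== PORT B =====
def compare_winning_numbers_alt (winning : List Int) (your : List Int) : Int :=
  let yours := PySem.Set.ofList your
  let count := (winning.filter (fun number => yours.contains number)).length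
  if count = 0 then 0 else 2 ^ (count - 1)

-- ===== PRECONDITION & SPEC =====
def Spec_compare_winning_numbers (winning : List Int) (your : List Int) (out : Int) : Prop := out = compare_winning_numbers_alt winning your
instance (winning : List Int) (your : List Int) (out : Int) : Decidable (Spec_compare_winning_numbers winning your out) := by unfold Spec_compare_winning_numbers; infer_instance

-- ===== CLAIM (what is proved, stated in full; the proofs are below) =====
def Claim_equal_compare_winning_numbers : Prop := ∀ (winning : List Int) (your : List Int), Dom_compare_winning_numbers winning your → Spec_compare_winning_numbers winning your (compare_winning_numbers winning your)

-- ===== LEMMAS AND PROOFS =====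

def pvScore (c : Nat) : Int := if c = 0 then 0 else 2 ^ (c - 1)

lemma pvScore_step (c : Nat) :
    (if pvScore c = 0 then pvScore c + 1 else pvScore c * 2) = pvScore (c + 1) := by
  unfold pvScore
  rcases Nat.eq_zero_or_pos c with h | h
  · subst h; norm_num
  · have h2 : (2:Int) ^ (c - 1) ≠ 0 := by positivity
    have hc : c ≠ 0 := Nat.pos_iff_ne_zero.mp h
    simp [hc]
    have : c - 1 + 1 = c := Nat.succ_pred_eq_of_pos h
    calc (2:Int) ^ (c - 1) * 2 = 2 ^ (c - 1 + 1) := by ring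
      _ = 2 ^ c := by rw [this]

lemma pvFold_invariant (winning your : List Int) (c : Nat) :
    winning.foldl (fun won number =>
      if number ∈ your then
        (if won = 0 then won + 1 else won * 2)
      else won) (pvScore c)
    = pvScore (c + (winning.filter (fun n => decide (n ∈ your))).length) := by
  induction winning generalizing c with
  | nil => simp
  | cons x xs ih =>
    by_cases hx : x ∈ your
    · simp only [List.foldl_cons, List.filter_cons, hx, if_pos, decide_true]
      rw [pvScore_step, ih (c + 1)]
      simp [List.length_cons]
      ring_nf
    · simp only [List.foldl_cons, List.filter_cons, hx, decide_false]
      simpa using ih c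

lemma pvMem_ofList (your : List Int) (n : Int) :
    (PySem.Set.ofList your).contains n = decide (n ∈ your) := by
  simp [PySem.Set.mem_ofList]

-- ===== VERDICT (by name: the statement is the Claim_ definition above) =====
theorem compare_winning_numbers_spec : Claim_equal_compare_winning_numbers := by
  intro winning your _
  unfold Spec_compare_winning_numbers compare_winning_numbers compare_winning_numbers_alt
  simp only [pvMem_ofList]
  have := pvFold_invariant winning your 0
  simpa [pvScore] using this
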